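-- pv_equiv track=rewrite | github.com/rlagusgh0223/Algorithm | 240407/프로그래머스, 주사위 게임 3.py | solution
-- ===== SOURCE A (Python) =====
-- def solution(a, b, c, d):
--     answer = 0
--     origin = [a, b, c, d]
--     check = list(set(origin))
--     check.sort()
--     # 네 주사위의 수가 같다면
--     if len(check) == 1:
--         answer = 1111 * check[0]
--     # 나온 주사위 수가 두 종류 뿐인데
--     elif len(check) == 2:
--         p, q = max(check), min(check)
--         # 그 중 3개의 값이 같고 하나만 다르다면(3 + 1)
--         if origin.count(p) == 3:
--             answer = (10 * p + q)**2
--         elif origin.count(q) == 3: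
--             answer = (10 * q + p)**2
--         # 각각 2개씩 있다면(2 + 2)
--         elif origin.count(p) == 2:
--             answer = (p+q) * abs(p-q)
--     # 두 개의 같은 값과 하나씩 다른값이라면(2 + 1 + 1)
--     elif len(check) == 3:
--         for i in range(len(check)):
--             if origin.count(check[i]) == 2:
--                 del check[i]
--                 break
--         answer = check[0] * check[1]
--     # 4개씩 값이 다르다면
--     else:
--         answer = min(check)
--
--     return answer
-- ===== SOURCE B (Python) =====
-- def solution(a, b, c, d):
--     w, x, y, z = sorted([a, b, c, d])
--     if w == z:                       # all four equal
--         return 1111 * w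
--     if x == z:                       # triple x = y = z, single w
--         return (10 * z + w) ** 2
--     if w == y:                       # triple w = x = y, single z
--         return (10 * w + z) ** 2
--     if w == x and y == z:            # two pairs
--         return (w + z) * (z - w)
--     if w == x:                       # one pair (the smallest two)
--         return y * z
--     if x == y:                       # one pair (the middle two)
--         return w * z
--     if y == z:                       # one pair (the largest two)
--         return w * x
--     return w                         # all distinct
-- ===== Notes on version B (the rewrite author's own statement) =====
-- stated objective: simpler
-- what changed: B sorts the four values once and decides every case by neighbour equalities of the sorted quadruple (w,x,y,z), replacing A's set construction, repeated origin.count passes and the index-deletion loop with direct closed-form branches.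
import Mathlib
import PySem

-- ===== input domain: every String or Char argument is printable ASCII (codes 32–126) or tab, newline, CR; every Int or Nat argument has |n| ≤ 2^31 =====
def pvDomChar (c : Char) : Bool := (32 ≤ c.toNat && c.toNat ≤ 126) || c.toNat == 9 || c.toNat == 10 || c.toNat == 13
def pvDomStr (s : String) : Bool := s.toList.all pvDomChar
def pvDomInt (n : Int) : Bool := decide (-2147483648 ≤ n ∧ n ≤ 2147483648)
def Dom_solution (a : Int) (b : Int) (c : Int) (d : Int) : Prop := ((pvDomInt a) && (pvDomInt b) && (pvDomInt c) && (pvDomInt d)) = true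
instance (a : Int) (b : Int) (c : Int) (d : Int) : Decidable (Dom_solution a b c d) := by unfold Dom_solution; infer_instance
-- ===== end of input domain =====

-- B sorts the four values once and branches on neighbour equalities of the sorted quadruple (simpler: no set, no count passes, no deletion loop).

-- ===== PORT A =====
-- the 'for i in range(len(check)): if origin.count(check[i]) == 2: del check[i]; break' loop:
-- scan check left to right, delete the first element whose count in origin is 2, stop.
def delFirstCount2 (origin : List Int) : List Int → List Int
  | [] => []
  | v :: rest => if PySem.List.count origin v = 2 then rest else v :: delFirstCount2 origin rest

def solution (a : Int) (b : Int) (c : Int) (d : Int) : Int :=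
  let origin : List Int := [a, b, c, d]
  let check := PySem.List.sorted (PySem.Set.ofList origin) (fun t => t) false
  if PySem.List.len check = 1 then
    1111 * PySem.List.pyGetD check 0 0
  else if PySem.List.len check = 2 then
    let p := (PySem.List.max? check (fun t => t)).getD 0
    let q := (PySem.List.min? check (fun t => t)).getD 0
    if PySem.List.count origin p = 3 then (10 * p + q) ^ 2
    else if PySem.List.count origin q = 3 then (10 * q + p) ^ 2
    else if PySem.List.count origin p = 2 then (p + q) * |p - q|
    else 0
  else if PySem.List.len check = 3 then
    let check' := delFirstCount2 origin check
    PySem.List.pyGetD check' 0 0 * PySem.List.pyGetD check' 1 0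
  else
    ((PySem.List.min? check (fun t => t)).getD 0)

-- ===== PORT B =====
def solution_alt (a : Int) (b : Int) (c : Int) (d : Int) : Int :=
  match PySem.List.sorted [a, b, c, d] (fun t => t) false with
  | [w, x, y, z] =>
    if w = z then 1111 * w
    else if x = z then (10 * z + w) ^ 2
    else if w = y then (10 * w + z) ^ 2
    else if w = x ∧ y = z then (w + z) * (z - w)
    else if w = x then y * z
    else if x = y then w * z
    else if y = z then w * x
    else w
  | _ => 0

-- ===== PRECONDITION & SPEC =====
def Spec_solution (a : Int) (b : Int) (c : Int) (d : Int) (out : Int) : Prop := out = solution_alt a b c d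
instance (a : Int) (b : Int) (c : Int) (d : Int) (out : Int) : Decidable (Spec_solution a b c d out) := by unfold Spec_solution; infer_instance

-- ===== CLAIM (what is proved, stated in full; the proofs are below) =====
def Claim_equal_solution : Prop := ∀ (a : Int) (b : Int) (c : Int) (d : Int), Dom_solution a b c d → Spec_solution a b c d (solution a b c d)

-- ===== LEMMAS AND PROOFS =====

theorem solution_eq_alt (a b c d : Int) : solution a b c d = solution_alt a b c d := by
  have hperm : (PySem.List.sorted [a,b,c,d] (fun t => t) false).Perm [a,b,c,d] :=
    PySem.List.sorted_perm _ _ _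
  have hpair := PySem.List.sorted_pairwise [a,b,c,d] (fun t : Int => t)
  have hlen : (PySem.List.sorted [a,b,c,d] (fun t : Int => t) false).length = 4 := by
    rw [PySem.List.length_sorted]; rfl
  obtain ⟨w, x, y, z, hs⟩ := List.length_eq_four.mp hlen
  rw [hs] at hperm hpair
  simp only [List.pairwise_cons, List.mem_cons, List.not_mem_nil] at hpair
  have hwx : w ≤ x := by simp at hpair; omega
  have hxy : x ≤ y := by simp at hpair; omega
  have hyz : y ≤ z := by simp at hpair; omega
  have hcount : ∀ v : Int, List.count v [a,b,c,d] = List.count v [w,x,y,z] := by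
    intro v; exact (hperm.count_eq v).symm
  have hmem : ∀ v : Int, v ∈ ([a,b,c,d] : List Int) ↔ v ∈ ([w,x,y,z] : List Int) := by
    intro v; exact (hperm.mem_iff).symm
  have hB : solution_alt a b c d =
      (if w = z then 1111 * w
       else if x = z then (10 * z + w) ^ 2
       else if w = y then (10 * w + z) ^ 2
       else if w = x ∧ y = z then (w + z) * (z - w)
       else if w = x then y * z
       else if x = y then w * z
       else if y = z then w * x
       else w) := by
    unfold solution_alt; rw [hs]
  have hcheck : ∀ ys : List Int, ys.Pairwise (· < ·) → (∀ v, v ∈ ys ↔ v ∈ ([w,x,y,z] : List Int)) →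
      PySem.List.sorted (PySem.Set.ofList [a,b,c,d]) (fun t : Int => t) false = ys := by
    intro ys hp hm
    apply PySem.List.sorted_eq_of_perm_of_pairwise_lt _ _ _ ?_ hp
    rw [List.perm_ext_iff_of_nodup (hp.imp fun h => ne_of_lt h) (PySem.Set.nodup_ofList _)]
    intro v
    rw [PySem.Set.mem_ofList, hm v, hmem v]
  by_cases h1 : w = x <;> by_cases h2 : x = y <;> by_cases h3 : y = z
  -- w = x = y = z
  · subst h1; subst h2; subst h3
    have hc := hcheck [w] (by simp) (by intro v; simp)
    rw [hB]; simp only [solution]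
    rw [hc]
    simp [PySem.List.len]
  -- w = x = y < z
  · subst h1; subst h2
    have hlt : w < z := lt_of_le_of_ne hyz h3
    have hc := hcheck [w, z] (by simp [hlt]) (by intro v; simp; try tauto)
    have cw : List.count w [a, b, c, d] = 3 := by
      rw [hcount w]; simp [ Ne.symm h3]
    have cz : List.count z [a, b, c, d] = 1 := by
      rw [hcount z]; simp [ h3]
    rw [hB]; simp only [solution]
    rw [hc]
    simp [PySem.List.len, PySem.List.max?_id_cons, PySem.List.min?_id_cons,
      max_eq_right hyz, min_eq_left hyz, cw, cz, h3]
  -- w = x < y = z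
  · subst h1; subst h3
    have hlt : w < y := lt_of_le_of_ne hxy h2
    have hc := hcheck [w, y] (by simp [hlt]) (by intro v; simp; try tauto)
    have cw : List.count w [a, b, c, d] = 2 := by
      rw [hcount w]; simp [ Ne.symm h2]
    have cy : List.count y [a, b, c, d] = 2 := by
      rw [hcount y]; simp [ h2]
    rw [hB]; simp only [solution]
    rw [hc]
    simp [PySem.List.len, PySem.List.max?_id_cons, PySem.List.min?_id_cons,
      max_eq_right hxy, min_eq_left hxy, cw, cy, h2,
      abs_of_nonneg (sub_nonneg.mpr hxy), add_comm]
  -- w = x < y < z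
  · subst h1
    have hlt1 : w < y := lt_of_le_of_ne hxy h2
    have hlt2 : y < z := lt_of_le_of_ne hyz h3
    have hlt3 : w < z := lt_trans hlt1 hlt2
    have hc := hcheck [w, y, z] (by simp [hlt1, hlt2, hlt3]) (by intro v; simp; try tauto)
    have cw : List.count w [a, b, c, d] = 2 := by
      rw [hcount w]; simp [ Ne.symm h2, Ne.symm hlt3.ne]
    rw [hB]; simp only [solution]
    rw [hc]
    simp [PySem.List.len, delFirstCount2, cw,
      PySem.List.pyGetD, PySem.List.pyGet?, PySem.List.pyIdx?,
      h2, h3, hlt3.ne]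
  -- w < x = y = z
  · subst h2; subst h3
    have hlt : w < x := lt_of_le_of_ne hwx h1
    have hc := hcheck [w, x] (by simp [hlt]) (by intro v; simp; try tauto)
    have cw : List.count w [a, b, c, d] = 1 := by
      rw [hcount w]; simp [ Ne.symm h1]
    have cx : List.count x [a, b, c, d] = 3 := by
      rw [hcount x]; simp [ h1]
    rw [hB]; simp only [solution]
    rw [hc]
    simp [PySem.List.len, PySem.List.max?_id_cons, PySem.List.min?_id_cons,
      max_eq_right hwx, min_eq_left hwx, cx, h1]
  -- w < x = y < z
  · subst h2
    have hlt1 : w < x := lt_of_le_of_ne hwx h1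
    have hlt2 : x < z := lt_of_le_of_ne hyz h3
    have hlt3 : w < z := lt_trans hlt1 hlt2
    have hc := hcheck [w, x, z] (by simp [hlt1, hlt2, hlt3]) (by intro v; simp; try tauto)
    have cw : List.count w [a, b, c, d] = 1 := by
      rw [hcount w]; simp [ Ne.symm h1, Ne.symm hlt3.ne]
    have cx : List.count x [a, b, c, d] = 2 := by
      rw [hcount x]; simp [ h1, Ne.symm h3]
    rw [hB]; simp only [solution]
    rw [hc]
    simp [PySem.List.len, delFirstCount2, cw, cx,
      PySem.List.pyGetD, PySem.List.pyGet?, PySem.List.pyIdx?,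
      h1, h3, hlt3.ne]
  -- w < x < y = z
  · subst h3
    have hlt1 : w < x := lt_of_le_of_ne hwx h1
    have hlt2 : x < y := lt_of_le_of_ne hxy h2
    have hlt3 : w < y := lt_trans hlt1 hlt2
    have hc := hcheck [w, x, y] (by simp [hlt1, hlt2, hlt3]) (by intro v; simp; try tauto)
    have cw : List.count w [a, b, c, d] = 1 := by
      rw [hcount w]; simp [ Ne.symm h1, Ne.symm hlt3.ne]
    have cx : List.count x [a, b, c, d] = 1 := by
      rw [hcount x]; simp [ h1, Ne.symm h2]
    have cy : List.count y [a, b, c, d] = 2 := by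
      rw [hcount y]; simp [ h2, hlt3.ne]
    rw [hB]; simp only [solution]
    rw [hc]
    simp [PySem.List.len, delFirstCount2, cw, cx, cy,
      PySem.List.pyGetD, PySem.List.pyGet?, PySem.List.pyIdx?,
      h1, h2, hlt3.ne]
  -- all distinct
  · have hlt1 : w < x := lt_of_le_of_ne hwx h1
    have hlt2 : x < y := lt_of_le_of_ne hxy h2
    have hlt3 : y < z := lt_of_le_of_ne hyz h3
    have hwy : w < y := lt_trans hlt1 hlt2
    have hxz : x < z := lt_trans hlt2 hlt3
    have hwz : w < z := lt_trans hlt1 hxz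
    have hc := hcheck [w, x, y, z] (by simp [hlt1, hlt2, hlt3, hwy, hxz, hwz]) (by intro v; simp)
    rw [hB]; simp only [solution]
    rw [hc]
    simp [PySem.List.len, PySem.List.min?_id_cons,
      h1, h2, h3, hwy.ne, hxz.ne, hwz.ne,
      min_eq_left (le_of_lt hlt1), min_eq_left (le_of_lt hwy), min_eq_left (le_of_lt hwz)]

-- ===== VERDICT (by name: the statement is the Claim_ definition above) =====
theorem solution_spec : Claim_equal_solution := by
  intro a b c d _
  unfold Spec_solution
  exact solution_eq_alt a b c d
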